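-- pv_equiv track=rewrite | github.com/pranvil/SIM_APDU_Parser | command_detail.py | parse_imei
-- ===== SOURCE A (Python) =====
-- def parse_imei(value):
--     if len(value) % 2 != 0:
--         return "Invalid IMEI length"
--
--     imei = []
--     for i in range(0, len(value), 2):
--         byte = value[i:i+2]
--         swapped_byte = byte[1] + byte[0]
--         imei.append(swapped_byte)
--
--     return ''.join(imei)
-- ===== SOURCE B (Python) =====
-- def parse_imei(value):
--     if len(value) % 2 != 0:
--         return "Invalid IMEI length"
--     return ''.join(a + b for a, b in zip(value[1::2], value[0::2]))
-- ===== Notes on version B (the rewrite author's own statement) =====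
-- stated objective: idiomatic
-- what changed: Replaces the explicit loop over 2-character windows with two strided slices (odd- and even-indexed characters) interleaved by zip and joined pairwise.
import Mathlib
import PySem

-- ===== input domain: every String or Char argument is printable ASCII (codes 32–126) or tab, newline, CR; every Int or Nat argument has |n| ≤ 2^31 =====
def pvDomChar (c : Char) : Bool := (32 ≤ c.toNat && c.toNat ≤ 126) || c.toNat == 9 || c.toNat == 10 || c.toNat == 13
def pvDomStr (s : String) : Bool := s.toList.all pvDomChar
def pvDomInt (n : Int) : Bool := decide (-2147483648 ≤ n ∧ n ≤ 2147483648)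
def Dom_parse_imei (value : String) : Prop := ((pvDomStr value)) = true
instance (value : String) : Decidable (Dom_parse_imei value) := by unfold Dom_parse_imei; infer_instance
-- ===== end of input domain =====

-- B swaps nibble pairs by interleaving two strided slices (odd/even indexed chars) with zip instead of looping over 2-char windows; objective: idiomatic.


-- ===== PORT A =====
def parse_imei (value : String) : String :=
  if value.toList.length % 2 ≠ 0 then "Invalid IMEI length"
  else
    let imei := (PySem.List.pyRange 0 (value.toList.length) 2).foldl (fun acc i =>
      let byte := PySem.List.slice value.toList (some i) (some (i + 2))
      let swapped := PySem.List.pyGetD byte 1 ' ' :: [PySem.List.pyGetD byte 0 ' ']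
      acc ++ [swapped]) ([] : List (List Char))
    String.ofList imei.flatten

-- ===== PORT B =====
def parse_imei_alt (value : String) : String :=
  if value.toList.length % 2 ≠ 0 then "Invalid IMEI length"
  else
    match PySem.List.slice? value.toList (some 1) none 2,
          PySem.List.slice? value.toList (some 0) none 2 with
    | some odds, some evens =>
        String.ofList (((odds.zip evens).map (fun p => [p.1, p.2])).flatten)
    | _, _ => ""   -- unreachable: step 2 ≠ 0, so slice? is always `some`

-- ===== PRECONDITION & SPEC =====
def Spec_parse_imei (value : String) (out : String) : Prop := out = parse_imei_alt value
instance (value : String) (out : String) : Decidable (Spec_parse_imei value out) := by unfold Spec_parse_imei; infer_instance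

-- ===== CLAIM (what is proved, stated in full; the proofs are below) =====
def Claim_equal_parse_imei : Prop := ∀ (value : String), Dom_parse_imei value → Spec_parse_imei value (parse_imei value)

-- ===== LEMMAS AND PROOFS =====

-- common closed form of the k-th output chunk: [cs[2k+1], cs[2k]]
def pvChunk (cs : List Char) (k : Nat) : List Char :=
  [cs.getD (2 * k + 1) ' ', cs.getD (2 * k) ' ']

-- xs[a::2] enumerated: the k-th kept element is xs[a+2k]
lemma pv_slice?_stride2 (cs : List Char) (a : Nat) (h : a ≤ cs.length) :
    PySem.List.slice? cs (some (a : Int)) none 2 =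
      some ((List.range ((cs.length - a + 1) / 2)).map (fun k => cs.getD (a + 2 * k) ' ')) := by
  unfold PySem.List.slice? PySem.List.sliceIndices
  simp only [if_neg (by norm_num : ¬ (2:Int) = 0)]
  norm_num
  have hs : ¬ ((a:Int) < 0) := by omega
  have hmin : min (a:Int) (cs.length:Int) = (a:Int) := by omega
  simp only [hs, if_false, hmin]
  have hcount : (if (a:Int) < (cs.length:Int) then (((cs.length:Int) - a + 2 - 1) / 2).toNat else 0)
      = (cs.length - a + 1) / 2 := by
    split_ifs with hlt <;> omega
  rw [hcount]
  rw [← List.filterMap_eq_map]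
  apply List.filterMap_congr
  intro k hk
  simp only [List.mem_range] at hk
  have hidx : ((a:Int) + 2 * (k:Int)).toNat = a + 2 * k := by omega
  have hlt : a + 2 * k < cs.length := by omega
  simp [hidx, List.getElem?_eq_getElem hlt, Function.comp]

-- A's window loop collects exactly the chunks
lemma pv_A_chunks (cs : List Char) (h : cs.length % 2 = 0) :
    (PySem.List.pyRange 0 (cs.length) 2).foldl (fun acc i =>
      acc ++ [[PySem.List.pyGetD (PySem.List.slice cs (some i) (some (i + 2))) 1 ' ',
               PySem.List.pyGetD (PySem.List.slice cs (some i) (some (i + 2))) 0 ' ']])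
      ([] : List (List Char)) =
      (List.range (cs.length / 2)).map (pvChunk cs) := by
  rw [PySem.List.foldl_append_singleton_eq_map,
    PySem.List.pyRange_of_pos 0 (cs.length) (by norm_num : (0:Int) < 2)]
  have hc : (if (0:Int) < (cs.length:Int) then ((((cs.length:Int)) - 0 + 2 - 1) / 2).toNat else 0)
      = cs.length / 2 := by
    split_ifs with hlt <;> omega
  rw [hc, List.map_map, List.nil_append]
  apply List.map_congr_left
  intro k hk
  simp only [List.mem_range] at hk
  have e1 : (0 : Int) + 2 * (k : Int) = ((2 * k : Nat) : Int) := by push_cast; ring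
  simp only [Function.comp, e1]
  have e2 : ((2 * k : Nat) : Int) + 2 = ((2 * k : Nat) : Int) + ((2 : Nat) : Int) := by norm_num
  rw [e2, PySem.List.slice_natCast_add]
  have h1 : 2 * k + 1 < cs.length := by omega
  have h0 : 2 * k < cs.length := by omega
  simp [PySem.List.pyGetD_ofNat', pvChunk, List.getD_eq_getElem?_getD, List.getElem?_drop, h0, h1]

-- ===== VERDICT (by name: the statement is the Claim_ definition above) =====
theorem parse_imei_spec : Claim_equal_parse_imei := by
  intro value _
  unfold Spec_parse_imei
  simp only [parse_imei, parse_imei_alt]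
  split_ifs with h
  · rfl
  · have h0 : value.toList.length % 2 = 0 := by omega
    cases hcs : value.toList with
    | nil => decide
    | cons c t =>
      rw [hcs] at h0
      rw [pv_A_chunks _ h0]
      rw [show (some (1:Int) : Option Int) = some ((1:Nat):Int) from by norm_num,
         show (some (0:Int) : Option Int) = some ((0:Nat):Int) from by norm_num]
      rw [pv_slice?_stride2 _ 1 (by simp), pv_slice?_stride2 _ 0 (by omega)]
      have r1 : ((c :: t).length - 1 + 1) / 2 = (c :: t).length / 2 := by
        simp only [List.length_cons]; omega
      have r2 : ((c :: t).length - 0 + 1) / 2 = (c :: t).length / 2 := by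
        simp only [List.length_cons] at h0 ⊢; omega
      simp only [r1, r2, List.zip_map', List.map_map]
      congr 2
      apply List.map_congr_left
      intro k hk
      simp [pvChunk, Nat.add_comm]
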